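-- pv_equiv track=rewrite | github.com/DancingOnAir/LeetcodePythonSolution | backtracking/2850_minimum_moves_to_spread_stones_over_grid.py | minimumMoves
-- ===== SOURCE A (Python) =====
-- from typing import List
-- from itertools import product, permutations
--
-- def minimumMoves(grid: List[List[int]]) -> int:
--     def backtracking(consumers, suppliers, idx):
--         if idx == len(zeros):
--             return 0
--         res = float('inf')
--         a, b = consumers[idx]
--         for x, y in suppliers:
--             if grid[x][y] == 1:
--                 continue
--
--             grid[x][y] -= 1
--             res = min(res, abs(x - a) + abs(y - b) + backtracking(consumers, suppliers, idx + 1))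
--             grid[x][y] += 1
--         return res
--
--     zeros, spares = [], []
--     for i, j in product(range(3), range(3)):
--         stones = grid[i][j]
--         if stones == 0:
--             zeros.append((i, j))
--         elif stones > 1:
--             spares.append((i, j))
--     return backtracking(zeros, spares, 0)
-- ===== SOURCE B (Python) =====
-- from typing import List
-- from itertools import product
--
-- def minimumMoves(grid: List[List[int]]) -> int:
--     empties = [(i, j) for i in range(3) for j in range(3) if grid[i][j] == 0]
--     donors = [(i, j) for i in range(3) for j in range(3) if grid[i][j] > 1]
--     costs = [sum(abs(sx - ex) + abs(sy - ey) for (sx, sy), (ex, ey) in zip(t, empties))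
--              for t in product(donors, repeat=len(empties))
--              if all(t.count(d) <= grid[d[0]][d[1]] - 1 for d in donors)]
--     return min(costs)
-- ===== Notes on version B (the rewrite author's own statement) =====
-- stated objective: alternative
-- what changed: A's recursive backtracking, which tracks remaining capacities by mutating and restoring the grid in place, is replaced by a flat generate-and-test: build the empty-cell and donor-cell lists once, enumerate every assignment tuple with itertools.product, keep the capacity-feasible ones, and take the min of their summed Manhattan costs.
-- outside the precondition, e.g. on minimumMoves([[0, 1, 1], [1, 1, 1], [1, 1, 1]]): A returns inf, B raises ValueError
import Mathlib
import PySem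

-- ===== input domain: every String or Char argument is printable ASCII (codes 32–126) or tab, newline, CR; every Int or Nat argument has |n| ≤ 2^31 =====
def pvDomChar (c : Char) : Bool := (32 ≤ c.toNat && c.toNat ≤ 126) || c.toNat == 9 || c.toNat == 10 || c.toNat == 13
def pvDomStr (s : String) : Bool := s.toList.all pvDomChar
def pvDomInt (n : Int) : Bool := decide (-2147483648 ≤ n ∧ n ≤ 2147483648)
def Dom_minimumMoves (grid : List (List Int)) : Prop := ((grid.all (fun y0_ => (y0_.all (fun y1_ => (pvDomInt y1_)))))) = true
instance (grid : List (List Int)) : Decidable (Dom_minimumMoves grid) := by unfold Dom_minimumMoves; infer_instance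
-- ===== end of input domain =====

-- B replaces A's recursive backtracking (which tracks capacities by mutating the grid) by a flat
-- generate-and-test: enumerate all assignment tuples, keep the capacity-feasible ones, take the min.
-- A's in-place grid mutation is fully undone before it returns, so only return values are at stake.

-- ===== PORT A =====
-- grid[x][y]; exact for indices 0..2 on a grid whose 3×3 shape exists (guaranteed by Pre_;
-- outside it Python raises IndexError, which Pre_ excludes)
def gget (g : List (List Int)) (x y : Int) : Int :=
  (PySem.List.pyGet? ((PySem.List.pyGet? g x).getD []) y).getD 0

-- grid[x][y] -= 1 (functional update; indices come from range(3), hence nonnegative)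
def decAt (g : List (List Int)) (x y : Int) : List (List Int) :=
  g.modify x.toNat (fun row => row.modify y.toNat (fun v => v - 1))

-- product(range(3), range(3))
def prod33 : List (Int × Int) :=
  (PySem.List.pyRange 0 3 1).flatMap (fun i => (PySem.List.pyRange 0 3 1).map (fun j => (i, j)))

-- Python's min where `none` stands for float('inf')
def pyMinOpt : Option Int → Option Int → Option Int
  | none, b => b
  | some a, none => some a
  | some a, some b => some (min a b)

-- backtracking(consumers, suppliers, idx): `none` = float('inf'); recursion consumes consumers[idx:]
def btA (g : List (List Int)) (S : List (Int × Int)) (Z : List (Int × Int)) : Option Int :=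
  match Z with
  | [] => some 0
  | z :: rest =>
    S.foldl (fun res c =>
      if gget g c.1 c.2 == 1 then res
      else pyMinOpt res ((btA (decAt g c.1 c.2) S rest).map
            (fun v => |c.1 - z.1| + |c.2 - z.2| + v))) none
termination_by Z.length
decreasing_by simp

def minimumMoves (grid : List (List Int)) : Int :=
  let zs := prod33.foldl (fun (acc : List (Int × Int) × List (Int × Int)) c =>
      let stones := gget grid c.1 c.2
      if stones == 0 then (acc.1 ++ [c], acc.2)
      else if 1 < stones then (acc.1, acc.2 ++ [c]) else acc) ([], [])
  -- A returns float('inf') (not an int) when the zeros cannot all be filled; Pre_ excludes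
  -- those inputs, so the .getD 0 placeholder is never what the claim is about
  (btA grid zs.2 zs.1).getD 0

-- ===== PORT B =====
-- hand port of itertools.product(S, repeat=n) (leftmost position varies slowest — exact)
def tuplesB (S : List (Int × Int)) : Nat → List (List (Int × Int))
  | 0 => [[]]
  | n + 1 => S.flatMap (fun c => (tuplesB S n).map (fun t => c :: t))

def costB (empties t : List (Int × Int)) : Int :=
  ((t.zip empties).map (fun p => |p.1.1 - p.2.1| + |p.1.2 - p.2.2|)).sum

def feasB (grid : List (List Int)) (donors : List (Int × Int)) (t : List (Int × Int)) : Bool :=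
  donors.all (fun d => decide ((t.count d : Int) ≤ gget grid d.1 d.2 - 1))

def minimumMoves_alt (grid : List (List Int)) : Int :=
  let empties := prod33.filter (fun c => gget grid c.1 c.2 == 0)
  let donors := prod33.filter (fun c => decide (1 < gget grid c.1 c.2))
  let costs := ((tuplesB donors empties.length).filter (feasB grid donors)).map (costB empties)
  match costs with
  | [] => 0   -- unreachable under Pre_ (Python's min([]) raises ValueError there)
  | c :: r => r.foldl min c

-- ===== PRECONDITION & SPEC =====
-- Exactly the inputs where Python A returns an int: the 3×3 shape exists (otherwise A raises
-- IndexError) and the zero cells can be covered by the surplus stones (otherwise A returns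
-- float('inf'), which is not a value of the declared int type; B raises ValueError there).
def Pre_minimumMoves (grid : List (List Int)) : Prop :=
  3 ≤ grid.length ∧
  3 ≤ ((PySem.List.pyGet? grid 0).getD []).length ∧
  3 ≤ ((PySem.List.pyGet? grid 1).getD []).length ∧
  3 ≤ ((PySem.List.pyGet? grid 2).getD []).length ∧
  ((prod33.filter (fun c => gget grid c.1 c.2 == 0)).length : Int) ≤
    (prod33.map (fun c => if 1 < gget grid c.1 c.2 then gget grid c.1 c.2 - 1 else 0)).sum
instance (grid : List (List Int)) : Decidable (Pre_minimumMoves grid) := by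
  unfold Pre_minimumMoves; infer_instance

def pvWitness_minimumMoves : List (List Int) := [[2, 1, 1], [1, 1, 1], [1, 1, 0]]

def Spec_minimumMoves (grid : List (List Int)) (out : Int) : Prop := out = minimumMoves_alt grid
instance (grid : List (List Int)) (out : Int) : Decidable (Spec_minimumMoves grid out) := by unfold Spec_minimumMoves; infer_instance

-- ===== CLAIM (what is proved, stated in full; the proofs are below) =====
def Claim_equal_minimumMoves : Prop := ∀ (grid : List (List Int)), Dom_minimumMoves grid → Pre_minimumMoves grid → Spec_minimumMoves grid (minimumMoves grid)

-- ===== LEMMAS AND PROOFS =====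

-- fold of pyMinOpt with `none` as bottom
def ofoldMin (l : List (Option Int)) : Option Int := l.foldl pyMinOpt none

-- the value B's comprehension computes, as an Option Int (none = empty candidate list)
def Fm (g : List (List Int)) (S : List (Int × Int)) (Z : List (Int × Int)) : Option Int :=
  ofoldMin (((tuplesB S Z.length).filter (feasB g S)).map (fun t => some (costB Z t)))

def ShapeG (g : List (List Int)) : Prop :=
  3 ≤ g.length ∧ ∀ i : Nat, i < 3 → 3 ≤ ((g[i]?).getD []).length

def InB (c : Int × Int) : Prop := 0 ≤ c.1 ∧ c.1 < 3 ∧ 0 ≤ c.2 ∧ c.2 < 3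


lemma pyMinOpt_none_right (r : Option Int) : pyMinOpt r none = r := by cases r <;> rfl

lemma pyMinOpt_assoc (a b c : Option Int) :
    pyMinOpt (pyMinOpt a b) c = pyMinOpt a (pyMinOpt b c) := by
  cases a <;> cases b <;> cases c <;> simp [pyMinOpt, min_assoc]

lemma foldl_pyMinOpt_eq (l : List (Option Int)) :
    ∀ acc, l.foldl pyMinOpt acc = pyMinOpt acc (ofoldMin l) := by
  induction l with
  | nil => intro acc; simp [ofoldMin, pyMinOpt_none_right]
  | cons a l ih =>
    intro acc
    simp only [ofoldMin, List.foldl_cons] at *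
    rw [ih (pyMinOpt acc a), ih (pyMinOpt none a), pyMinOpt_assoc]
    rfl

lemma ofoldMin_cons (a : Option Int) (l : List (Option Int)) :
    ofoldMin (a :: l) = pyMinOpt a (ofoldMin l) := by
  show (a :: l).foldl pyMinOpt none = _
  rw [List.foldl_cons, foldl_pyMinOpt_eq]
  rfl

lemma ofoldMin_append (l1 l2 : List (Option Int)) :
    ofoldMin (l1 ++ l2) = pyMinOpt (ofoldMin l1) (ofoldMin l2) := by
  show (l1 ++ l2).foldl pyMinOpt none = _
  rw [List.foldl_append, foldl_pyMinOpt_eq]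
  rfl

lemma ofoldMin_flatMap {α : Type} (l : List α) (f : α → List (Option Int)) :
    ofoldMin (l.flatMap f) = ofoldMin (l.map (fun x => ofoldMin (f x))) := by
  induction l with
  | nil => rfl
  | cons a l ih => rw [List.flatMap_cons, ofoldMin_append, List.map_cons, ofoldMin_cons, ih]

lemma ofoldMin_map_addc {α : Type} (l : List α) (d : Int) (f : α → Int) :
    ofoldMin (l.map (fun x => some (d + f x))) =
      (ofoldMin (l.map (fun x => some (f x)))).map (fun v => d + v) := by
  induction l with
  | nil => rfl
  | cons a l ih =>
    rw [List.map_cons, List.map_cons, ofoldMin_cons, ofoldMin_cons, ih]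
    cases h : ofoldMin (l.map (fun x => some (f x))) <;> simp [pyMinOpt]

lemma foldl_skip {α : Type} (S : List α) (p : α → Bool) (v : α → Option Int) :
    S.foldl (fun r c => if p c then r else pyMinOpt r (v c)) none
      = ofoldMin (S.map (fun c => if p c then none else v c)) := by
  suffices h : ∀ (S : List α) (acc : Option Int),
      S.foldl (fun r c => if p c then r else pyMinOpt r (v c)) acc
        = pyMinOpt acc (ofoldMin (S.map (fun c => if p c then none else v c))) by
    rw [h S none]; rfl
  intro S
  induction S with
  | nil => intro acc; simp [ofoldMin, pyMinOpt_none_right]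
  | cons a S ih =>
    intro acc
    rw [List.foldl_cons, ih, List.map_cons, ofoldMin_cons]
    by_cases hp : p a
    · simp only [hp, if_true]
      rfl
    · simp only [hp, if_false, Bool.false_eq_true]
      rw [pyMinOpt_assoc]

lemma foldl_min_min (r : List Int) : ∀ c d : Int, r.foldl min (min c d) = min c (r.foldl min d) := by
  induction r with
  | nil => intro c d; rfl
  | cons e r ih =>
    intro c d
    simp only [List.foldl_cons]
    rw [min_assoc, ih, ih]

lemma ofoldMin_map_some (r : List Int) (c : Int) :
    ofoldMin ((c :: r).map some) = some (r.foldl min c) := by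
  induction r generalizing c with
  | nil => rfl
  | cons d r ih =>
    have h1 : ofoldMin ((c :: d :: r).map some)
        = pyMinOpt (pyMinOpt (some c) (some d)) (ofoldMin (r.map some)) := by
      simp only [List.map_cons, ofoldMin_cons, pyMinOpt_assoc]
    rw [h1]
    have h2 := ih (min c d)
    simp only [List.map_cons, ofoldMin_cons] at h2
    have h3 : pyMinOpt (some c) (some d) = some (min c d) := rfl
    rw [h3, h2, List.foldl_cons, foldl_min_min]

lemma filter_flatMap' {α β : Type} (l : List α) (f : α → List β) (p : β → Bool) :
    (l.flatMap f).filter p = l.flatMap (fun x => (f x).filter p) := by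
  induction l with
  | nil => rfl
  | cons a l ih => rw [List.flatMap_cons, List.filter_append, ih, List.flatMap_cons]

lemma shape_decAt (g : List (List Int)) (a b : Int) (hs : ShapeG g) :
    ShapeG (decAt g a b) := by
  obtain ⟨h1, h2⟩ := hs
  constructor
  · unfold decAt
    rw [List.length_modify]
    exact h1
  · intro i hi
    have hmod : (decAt g a b)[i]? =
        (fun r => if a.toNat = i then r.modify b.toNat (fun v => v - 1) else r) <$> g[i]? := by
      unfold decAt
      exact List.getElem?_modify _ _ _ _
    rw [hmod]
    have := h2 i hi
    cases hg : g[i]? with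
    | none => rw [hg] at this; exact this
    | some r =>
      rw [hg] at this
      simp only [Option.getD_some] at this
      show 3 ≤ ((some (if a.toNat = i then r.modify b.toNat (fun v => v - 1) else r)).getD []).length
      rw [Option.getD_some]
      split <;> simp [List.length_modify, this]

lemma gget_decAt (g : List (List Int)) (a b x y : Int)
    (hs : ShapeG g) (ha : InB (a, b)) (hx : InB (x, y)) :
    gget (decAt g a b) x y = if x = a ∧ y = b then gget g x y - 1 else gget g x y := by
  unfold InB at ha hx
  obtain ⟨ha1, ha2, hb1, hb2⟩ := ha
  obtain ⟨hx1, hx2, hy1, hy2⟩ := hx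
  dsimp only at ha1 ha2 hb1 hb2 hx1 hx2 hy1 hy2
  obtain ⟨hg1, hg2⟩ := hs
  have hlt : x.toNat < g.length := by omega
  have hrow : g[x.toNat]? = some g[x.toNat] := List.getElem?_eq_getElem hlt
  set row := g[x.toNat] with hrowdef
  have hrl : 3 ≤ row.length := by
    have := hg2 x.toNat (by omega)
    rw [hrow] at this
    simpa using this
  have hyin : y.toNat < row.length := by omega
  have hsome : row[y.toNat]? = some row[y.toNat] := List.getElem?_eq_getElem hyin
  have hgv : gget g x y = row[y.toNat] := by
    unfold gget
    rw [PySem.List.pyGet?_of_nonneg _ hx1, hrow]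
    rw [show (some row).getD ([] : List Int) = row from rfl]
    rw [PySem.List.pyGet?_of_nonneg _ hy1, hsome, Option.getD_some]
  have hmod : (decAt g a b)[x.toNat]? =
      some (if a.toNat = x.toNat then row.modify b.toNat (fun v => v - 1) else row) := by
    unfold decAt
    rw [List.getElem?_modify, hrow]
    rfl
  have hgd : gget (decAt g a b) x y =
      ((if a.toNat = x.toNat then row.modify b.toNat (fun v => v - 1) else row)[y.toNat]?).getD 0 := by
    unfold gget
    rw [PySem.List.pyGet?_of_nonneg _ hx1, hmod]
    simp only [Option.getD_some]
    rw [PySem.List.pyGet?_of_nonneg _ hy1]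
  by_cases hxa : x = a
  · have hax : a.toNat = x.toNat := by omega
    rw [hgd, if_pos hax, List.getElem?_modify, hsome]
    rw [show ((fun v => if b.toNat = y.toNat then v - 1 else v) <$> some row[y.toNat])
        = some (if b.toNat = y.toNat then row[y.toNat] - 1 else row[y.toNat]) from rfl]
    rw [Option.getD_some]
    by_cases hyb : y = b
    · have hby : b.toNat = y.toNat := by omega
      rw [if_pos hby, if_pos ⟨hxa, hyb⟩, hgv]
    · have hby : ¬ b.toNat = y.toNat := by omega
      rw [if_neg hby, if_neg (fun h => hyb h.2), hgv]
  · have hax : ¬ a.toNat = x.toNat := by omega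
    rw [hgd, if_neg hax, hsome]
    simp only [Option.getD_some]
    rw [if_neg (fun h => hxa h.1), hgv]

lemma feas_cons (g : List (List Int)) (S : List (Int × Int)) (c : Int × Int) (t : List (Int × Int))
    (hs : ShapeG g) (hc : InB c) (hin : ∀ d ∈ S, InB d) (hcap : 2 ≤ gget g c.1 c.2) :
    feasB g S (c :: t) = feasB (decAt g c.1 c.2) S t := by
  unfold feasB
  induction S with
  | nil => rfl
  | cons d S ih =>
    simp only [List.all_cons]
    have hd : InB d := hin d (List.mem_cons_self ..)
    have htl : ∀ e ∈ S, InB e := fun e he => hin e (List.mem_cons_of_mem _ he)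
    rw [ih htl]
    congr 1
    have hdec : gget (decAt g c.1 c.2) d.1 d.2
        = if d.1 = c.1 ∧ d.2 = c.2 then gget g d.1 d.2 - 1 else gget g d.1 d.2 := by
      have := gget_decAt g c.1 c.2 d.1 d.2 hs hc hd
      simpa using this
    by_cases hdc : d = c
    · subst hdc
      rw [List.count_cons_self, hdec, if_pos ⟨rfl, rfl⟩]
      rw [decide_eq_decide]
      push_cast
      omega
    · have hne : ¬ (d.1 = c.1 ∧ d.2 = c.2) := by
        intro h
        exact hdc (Prod.ext h.1 h.2)
      have hcnt : (c :: t).count d = t.count d := by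
        rw [List.count_cons]
        simp [show ¬ c = d from fun h => hdc h.symm]
      rw [hcnt, hdec, if_neg hne]

lemma costB_cons (z c : Int × Int) (Z t : List (Int × Int)) :
    costB (z :: Z) (c :: t) = |c.1 - z.1| + |c.2 - z.2| + costB Z t := by
  simp [costB, add_assoc]

lemma btA_eq_Fm (Z : List (Int × Int)) :
    ∀ (g : List (List Int)) (S : List (Int × Int)),
      ShapeG g → (∀ c ∈ S, InB c) → (∀ c ∈ S, 1 ≤ gget g c.1 c.2) →
      btA g S Z = Fm g S Z := by
  induction Z with
  | nil =>
    intro g S hs hin hcap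
    have hfeas : feasB g S [] = true := by
      simp only [feasB, List.all_eq_true]
      intro d hd
      have := hcap d hd
      simp only [List.count_nil, decide_eq_true_eq]
      push_cast
      omega
    rw [show btA g S [] = some 0 from by rw [btA]]
    unfold Fm
    simp only [List.length_nil, tuplesB, List.filter_cons, hfeas, if_true, List.filter_nil,
      List.map_cons, List.map_nil]
    rfl
  | cons z Z' ih =>
    intro g S hs hin hcap
    have hA : btA g S (z :: Z') = S.foldl (fun res c =>
        if gget g c.1 c.2 == 1 then res
        else pyMinOpt res ((btA (decAt g c.1 c.2) S Z').map
              (fun v => |c.1 - z.1| + |c.2 - z.2| + v))) none := by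
      rw [btA]
    rw [hA, foldl_skip S (fun c => gget g c.1 c.2 == 1)
      (fun c => (btA (decAt g c.1 c.2) S Z').map (fun v => |c.1 - z.1| + |c.2 - z.2| + v))]
    unfold Fm
    simp only [List.length_cons, tuplesB]
    rw [filter_flatMap', List.map_flatMap, ofoldMin_flatMap]
    apply congrArg
    apply List.map_congr_left
    intro c hcS
    have hcB : InB c := hin c hcS
    by_cases h1 : gget g c.1 c.2 == 1
    · have hg1 : gget g c.1 c.2 = 1 := by simpa using h1
      have hnil : ((tuplesB S Z'.length).map (fun t => c :: t)).filter (feasB g S) = [] := by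
        rw [List.filter_eq_nil_iff]
        intro t ht
        simp only [List.mem_map] at ht
        obtain ⟨t', -, rfl⟩ := ht
        simp only [feasB, List.all_eq_true, not_forall]
        refine ⟨c, hcS, ?_⟩
        simp only [decide_eq_true_eq, List.count_cons_self, hg1]
        push_cast
        omega
      simp only [h1, if_true, hnil, List.map_nil]
      rfl
    · have hg1 : ¬ gget g c.1 c.2 = 1 := by simpa using h1
      have hcap2 : 2 ≤ gget g c.1 c.2 := by
        have := hcap c hcS
        omega
      have hcapd : ∀ d ∈ S, 1 ≤ gget (decAt g c.1 c.2) d.1 d.2 := by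
        intro d hd
        have hdec := gget_decAt g c.1 c.2 d.1 d.2 hs hcB (hin d hd)
        have := hcap d hd
        rw [hdec]
        by_cases hdc : d.1 = c.1 ∧ d.2 = c.2
        · rw [if_pos hdc, hdc.1, hdc.2]
          omega
        · rw [if_neg hdc]
          omega
      have hfilter : ((tuplesB S Z'.length).map (fun t => c :: t)).filter (feasB g S)
          = ((tuplesB S Z'.length).filter (feasB (decAt g c.1 c.2) S)).map (fun t => c :: t) := by
        rw [List.filter_map]
        apply congrArg
        apply List.filter_congr
        intro t ht
        exact feas_cons g S c t hs hcB hin hcap2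
      have hIH := ih (decAt g c.1 c.2) S (shape_decAt g c.1 c.2 hs) hin hcapd
      simp only [h1, Bool.false_eq_true, if_false, hfilter, List.map_map]
      have hcost : ((fun t => some (costB (z :: Z') t)) ∘ (fun t => c :: t))
          = fun t => some ((|c.1 - z.1| + |c.2 - z.2|) + costB Z' t) := by
        funext t
        simp [Function.comp, costB_cons]
      rw [hcost, ofoldMin_map_addc ((tuplesB S Z'.length).filter (feasB (decAt g c.1 c.2) S))
            (|c.1 - z.1| + |c.2 - z.2|) (fun t => costB Z' t), hIH]
      unfold Fm
      rfl

lemma prod33_InB : ∀ c ∈ prod33, InB c := by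
  have h : prod33 = [(0,0),(0,1),(0,2),(1,0),(1,1),(1,2),(2,0),(2,1),(2,2)] := by decide
  rw [h]
  intro c hc
  unfold InB
  fin_cases hc <;> norm_num

lemma foldl_zs (grid : List (List Int)) (l : List (Int × Int)) :
    ∀ acc : List (Int × Int) × List (Int × Int),
      l.foldl (fun acc c =>
        let stones := gget grid c.1 c.2
        if stones == 0 then (acc.1 ++ [c], acc.2)
        else if 1 < stones then (acc.1, acc.2 ++ [c]) else acc) acc
      = (acc.1 ++ l.filter (fun c => gget grid c.1 c.2 == 0),
         acc.2 ++ l.filter (fun c => decide (1 < gget grid c.1 c.2))) := by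
  induction l with
  | nil => intro acc; simp
  | cons c l ih =>
    intro acc
    rw [List.foldl_cons, ih, List.filter_cons, List.filter_cons]
    by_cases h0 : gget grid c.1 c.2 == 0
    · have hz : gget grid c.1 c.2 = 0 := by simpa using h0
      have h1 : ¬ (1 < gget grid c.1 c.2) := by omega
      simp only [hz]
      norm_num
    · simp only [h0, Bool.false_eq_true, if_false]
      by_cases h1 : 1 < gget grid c.1 c.2
      · simp [h1]
      · simp [h1]

lemma pre_shape (grid : List (List Int)) (h : Pre_minimumMoves grid) : ShapeG grid := by
  obtain ⟨h1, h2, h3, h4, -⟩ := h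
  rw [PySem.List.pyGet?_of_nonneg _ (by norm_num)] at h2 h3 h4
  constructor
  · exact h1
  · intro i hi
    interval_cases i
    · simpa using h2
    · simpa using h3
    · simpa using h4

-- ===== VERDICT (by name: the statement is the Claim_ definition above) =====
theorem minimumMoves_spec : Claim_equal_minimumMoves := by
  intro grid _hdom hpre
  unfold Spec_minimumMoves minimumMoves minimumMoves_alt
  simp only []
  rw [foldl_zs grid prod33 ([], [])]
  simp only [List.nil_append]
  have hshape := pre_shape grid hpre
  have hinB : ∀ c ∈ prod33.filter (fun c => decide (1 < gget grid c.1 c.2)), InB c :=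
    fun c hc => prod33_InB c (List.mem_of_mem_filter hc)
  have hcap : ∀ c ∈ prod33.filter (fun c => decide (1 < gget grid c.1 c.2)),
      1 ≤ gget grid c.1 c.2 := by
    intro c hc
    have := (List.mem_filter.mp hc).2
    simp only [decide_eq_true_eq] at this
    omega
  have hmain := btA_eq_Fm (prod33.filter (fun c => gget grid c.1 c.2 == 0)) grid
    (prod33.filter (fun c => decide (1 < gget grid c.1 c.2))) hshape hinB hcap
  rw [hmain]
  unfold Fm
  have hmapmap :
      ((tuplesB (prod33.filter (fun c => decide (1 < gget grid c.1 c.2)))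
          (prod33.filter (fun c => gget grid c.1 c.2 == 0)).length).filter
          (feasB grid (prod33.filter (fun c => decide (1 < gget grid c.1 c.2))))).map
        (fun t => some (costB (prod33.filter (fun c => gget grid c.1 c.2 == 0)) t))
      = (((tuplesB (prod33.filter (fun c => decide (1 < gget grid c.1 c.2)))
          (prod33.filter (fun c => gget grid c.1 c.2 == 0)).length).filter
          (feasB grid (prod33.filter (fun c => decide (1 < gget grid c.1 c.2))))).map
        (costB (prod33.filter (fun c => gget grid c.1 c.2 == 0)))).map some := by
    rw [List.map_map]
    rfl
  rw [hmapmap]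
  cases hcost : ((tuplesB (prod33.filter (fun c => decide (1 < gget grid c.1 c.2)))
          (prod33.filter (fun c => gget grid c.1 c.2 == 0)).length).filter
          (feasB grid (prod33.filter (fun c => decide (1 < gget grid c.1 c.2))))).map
        (costB (prod33.filter (fun c => gget grid c.1 c.2 == 0))) with
  | nil => rfl
  | cons c r =>
    rw [ofoldMin_map_some]
    rfl
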